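-- pv_equiv track=rewrite | github.com/girishji/EPIJudge | epi_judge_python/nearest_repeated_entries.py | find_nearest_repetition
-- ===== SOURCE A (Python) =====
-- from typing import List
--
-- def find_nearest_repetition(paragraph: List[str]) -> int:
--     freq = {}
--     for i, w in enumerate(paragraph):
--         if w not in freq:
--             freq[w] = (i, len(paragraph))
--         else:
--             d = freq[w]
--             freq[w] = (i, min(d[1], i - d[0]))
--     minval = min([d[1] for d in freq.values()]) if freq else -1
--     return minval if minval < len(paragraph) else -1
-- ===== SOURCE B (Python) =====
-- from typing import List
--
-- def find_nearest_repetition(paragraph: List[str]) -> int: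
--     best = -1
--     for i in range(len(paragraph)):
--         for j in range(i + 1, len(paragraph)):
--             if paragraph[j] == paragraph[i] and (best == -1 or j - i < best):
--                 best = j - i
--     return best
-- ===== Notes on version B (the rewrite author's own statement) =====
-- stated objective: simpler
-- what changed: B replaces A's dict of per-word (last index, min gap) pairs and its final reduction over dict values by a plain brute-force double loop over index pairs maintaining one running minimum, with no dictionary at all.
import Mathlib
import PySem

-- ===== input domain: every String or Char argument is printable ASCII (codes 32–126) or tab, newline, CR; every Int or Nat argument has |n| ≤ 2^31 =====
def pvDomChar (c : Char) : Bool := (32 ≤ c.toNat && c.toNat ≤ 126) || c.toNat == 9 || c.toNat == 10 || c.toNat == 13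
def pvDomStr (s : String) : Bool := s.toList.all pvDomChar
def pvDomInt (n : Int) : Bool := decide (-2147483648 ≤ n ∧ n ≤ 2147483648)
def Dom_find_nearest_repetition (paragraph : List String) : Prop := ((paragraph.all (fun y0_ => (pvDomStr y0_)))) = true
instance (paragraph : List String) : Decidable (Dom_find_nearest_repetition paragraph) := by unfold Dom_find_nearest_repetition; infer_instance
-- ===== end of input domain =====

-- B replaces A's dict of per-word (last index, min gap) pairs and its final reduction over the
-- dict values by a dictionary-free brute-force double loop over index pairs keeping one running
-- minimum: simpler (shorter, no data structure), at the price of O(n^2) instead of A's O(n).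

-- ===== PORT A =====
-- loop body of A: freq[w] tracks (last index, min gap so far for w); n = len(paragraph)
def fnrStepA (n : Int) (freq : PySem.Dict String (Int × Int)) (iw : Int × String) :
    PySem.Dict String (Int × Int) :=
  if freq.contains iw.2 = false then
    freq.insert iw.2 (iw.1, n)
  else
    let d := freq.getD iw.2 (0, 0)
    freq.insert iw.2 (iw.1, min d.2 (iw.1 - d.1))

def find_nearest_repetition (paragraph : List String) : Int :=
  let n : Int := paragraph.length
  let freq := (PySem.List.enumerate paragraph).foldl (fnrStepA n) PySem.Dict.empty
  let minval : Int :=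
    if freq.size ≠ 0 then
      (PySem.List.min? (freq.values.map (fun d => d.2)) (fun x => x)).getD (-1)
    else -1
  if minval < n then minval else -1

-- ===== PORT B =====
-- brute force over all index pairs i < j; paragraph[j] / paragraph[i] are in range, so pyGetD is exact
def find_nearest_repetition_alt (paragraph : List String) : Int :=
  (PySem.List.pyRange 0 (PySem.List.len paragraph) 1).foldl
    (fun best i =>
      (PySem.List.pyRange (i + 1) (PySem.List.len paragraph) 1).foldl
        (fun best j =>
          if PySem.List.pyGetD paragraph j "" == PySem.List.pyGetD paragraph i ""
              && (best == -1 || j - i < best) then j - i else best)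
        best)
    (-1)

-- ===== PRECONDITION & SPEC =====
def Spec_find_nearest_repetition (paragraph : List String) (out : Int) : Prop := out = find_nearest_repetition_alt paragraph
instance (paragraph : List String) (out : Int) : Decidable (Spec_find_nearest_repetition paragraph out) := by unfold Spec_find_nearest_repetition; infer_instance

-- ===== CLAIM (what is proved, stated in full; the proofs are below) =====
def Claim_equal_find_nearest_repetition : Prop := ∀ (paragraph : List String), Dom_find_nearest_repetition paragraph → Spec_find_nearest_repetition paragraph (find_nearest_repetition paragraph)

-- ===== LEMMAS AND PROOFS =====

-- Intermediate one-pass form used only by the proof: last-index dict plus one running minimum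
-- (sentinel n).  A is first shown equal to this, then this is shown equal to B via the common
-- characterization "minimal gap j - i over pairs i < j with paragraph[i] = paragraph[j]".
def fnrStepB (st : PySem.Dict String Int × Int) (iw : Int × String) :
    PySem.Dict String Int × Int :=
  let nearest :=
    if st.1.contains iw.2 then
      let d := iw.1 - st.1.getD iw.2 0
      if d < st.2 then d else st.2
    else st.2
  (st.1.insert iw.2 iw.1, nearest)

def fnrOnePass (paragraph : List String) : Int :=
  let n : Int := paragraph.length
  let st := (PySem.List.enumerate paragraph).foldl fnrStepB (PySem.Dict.empty, n)
  if st.2 < n then st.2 else -1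

theorem get?_mk_map (g : Int × Int → Int) (l : List (String × (Int × Int))) (k : String) :
    (PySem.Dict.mk (l.map (fun p => (p.1, g p.2)))).get? k
      = ((PySem.Dict.mk l).get? k).map g := by
  induction l with
  | nil => simp [PySem.Dict.get?]
  | cons p t ih =>
    obtain ⟨pk, pv⟩ := p
    by_cases h : pk == k
    · simp [PySem.Dict.get?_mk_cons, h]
    · simp only [List.map_cons, PySem.Dict.get?_mk_cons, h, Bool.false_eq_true, if_false]
      exact ih

theorem fm_comm (l : List Int) : ∀ (a b : Int), l.foldl min (min a b) = min b (l.foldl min a) := by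
  induction l with
  | nil => intro a b; simp [min_comm]
  | cons x t ih =>
    intro a b
    simp only [List.foldl_cons]
    rw [show min (min a b) x = min (min a x) b by omega, ih (min a x) b]

theorem fm_le (l : List Int) : ∀ (a : Int), l.foldl min a ≤ a := by
  induction l with
  | nil => simp
  | cons x t ih => intro a; simpa using le_trans (ih (min a x)) (by omega)

theorem fm_mem_le (l : List Int) : ∀ (a x : Int), x ∈ l → l.foldl min a ≤ x := by
  induction l with
  | nil => intro a x h; cases h
  | cons y t ih =>
    intro a x h
    rcases List.mem_cons.mp h with rfl | h
    · exact le_trans (fm_le t (min a x)) (by omega)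
    · exact ih _ _ h

theorem foldl_min_replace (w : String) (nv : Int × Int) :
    ∀ (l : List (String × (Int × Int))) (d : Int × Int),
      (w, d) ∈ l → (l.map (fun p => p.1)).Nodup → nv.2 ≤ d.2 →
      ∀ a : Int,
      ((l.map (fun p => if p.1 == w then (w, nv) else p)).map (fun p => p.2.2)).foldl min a
        = min nv.2 ((l.map (fun p => p.2.2)).foldl min a) := by
  intro l
  induction l with
  | nil => intro d h; cases h
  | cons p t ih =>
    intro d hmem hnd hle a
    simp only [List.map_cons, List.nodup_cons] at hnd
    rcases List.mem_cons.mp hmem with heq | hmem'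
    · have hp1 : p.1 = w := by rw [← heq]
      have hrepl : t.map (fun q => if q.1 == w then (w, nv) else q) = t := by
        conv_rhs => rw [← List.map_id t]
        apply List.map_congr_left
        intro q hq
        have : q.1 ≠ w := by
          intro hqw
          exact hnd.1 (by rw [← hp1] at hqw; exact hqw ▸ List.mem_map_of_mem hq)
        simp [this]
      simp only [List.map_cons, hp1, beq_self_eq_true, if_true, hrepl, List.foldl_cons]
      have hd2 : p.2.2 = d.2 := by rw [← heq]
      rw [hd2, fm_comm, fm_comm]
      omega
    · have hw_in : w ∈ t.map (fun p => p.1) := List.mem_map.mpr ⟨(w, d), hmem', rfl⟩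
      have hp1 : p.1 ≠ w := fun h => hnd.1 (h ▸ hw_in)
      have hp1b : (p.1 == w) = false := by simp [hp1]
      simp only [List.map_cons, hp1b, Bool.false_eq_true, if_false, List.foldl_cons]
      exact ih d hmem' hnd.2 hle (min a p.2.2)

-- the single-pass invariant: the one-pass state is determined by A's table
theorem fnr_loop (n : Int) (l : List (Int × String)) :
    ∀ (freq : PySem.Dict String (Int × Int)) (last : PySem.Dict String Int) (nearest : Int),
    last = PySem.Dict.mk (freq.items.map (fun p => (p.1, p.2.1))) →
    nearest = (freq.items.map (fun p => p.2.2)).foldl min n →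
    (∀ p ∈ freq.items, p.2.2 ≤ n) →
    (freq.items.map (fun p => p.1)).Nodup →
    (l.foldl fnrStepB (last, nearest)).1
        = PySem.Dict.mk ((l.foldl (fnrStepA n) freq).items.map (fun p => (p.1, p.2.1)))
    ∧ (l.foldl fnrStepB (last, nearest)).2
        = ((l.foldl (fnrStepA n) freq).items.map (fun p => p.2.2)).foldl min n
    ∧ (∀ p ∈ (l.foldl (fnrStepA n) freq).items, p.2.2 ≤ n)
    ∧ ((l.foldl (fnrStepA n) freq).items.map (fun p => p.1)).Nodup := by
  induction l with
  | nil => intro freq last nearest h1 h2 h3 h4; exact ⟨h1, h2, h3, h4⟩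
  | cons iw t ih =>
    intro freq last nearest h1 h2 h3 h4
    simp only [List.foldl_cons]
    -- lookups in `last` are fst-projected lookups in `freq`
    have hget : ∀ k, last.get? k = (freq.get? k).map (fun v => v.1) := by
      intro k; rw [h1]; exact get?_mk_map (fun v => v.1) freq.items k
    have hcont : last.contains iw.2 = freq.contains iw.2 := by
      rw [PySem.Dict.contains_eq_isSome_get?, PySem.Dict.contains_eq_isSome_get?, hget]
      cases freq.get? iw.2 <;> rfl
    by_cases hc : freq.contains iw.2
    · -- repeated word
      obtain ⟨d, hd⟩ : ∃ d, freq.get? iw.2 = some d := by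
        rw [PySem.Dict.contains_eq_isSome_get?] at hc
        cases h : freq.get? iw.2 with
        | none => rw [h] at hc; cases hc
        | some v => exact ⟨v, rfl⟩
      have hmem : (iw.2, d) ∈ freq.items := PySem.Dict.mem_items_of_get?_eq_some _ hd
      have hgetD : freq.getD iw.2 (0, 0) = d := PySem.Dict.getD_of_get?_eq_some _ _ hd
      have hlastD : last.getD iw.2 0 = d.1 := by
        rw [PySem.Dict.getD_eq_get?_getD, hget, hd]; rfl
      have hstepA : fnrStepA n freq iw = freq.insert iw.2 (iw.1, min d.2 (iw.1 - d.1)) := by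
        simp [fnrStepA, hc, hgetD]
      have hitems : (freq.insert iw.2 (iw.1, min d.2 (iw.1 - d.1))).items
          = freq.items.map (fun p => if p.1 == iw.2 then (iw.2, (iw.1, min d.2 (iw.1 - d.1))) else p) :=
        PySem.Dict.items_insert_of_contains _ _ hc
      have hstepB : fnrStepB (last, nearest) iw
          = (last.insert iw.2 iw.1,
             if iw.1 - d.1 < nearest then iw.1 - d.1 else nearest) := by
        simp [fnrStepB, hcont, hc, hlastD]
      have hlastc : last.contains iw.2 = true := by rw [hcont]; exact hc
      -- the new `last` is the fst-projection of the new table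
      have hlast' : last.insert iw.2 iw.1
          = PySem.Dict.mk ((fnrStepA n freq iw).items.map (fun p => (p.1, p.2.1))) := by
        apply PySem.Dict.ext
        rw [PySem.Dict.items_insert_of_contains _ _ hlastc, hstepA, hitems, h1]
        show (freq.items.map fun p => (p.1, p.2.1)).map _ = _
        rw [List.map_map, List.map_map]
        apply List.map_congr_left
        intro p _
        by_cases hp : p.1 = iw.2 <;> simp [hp]
      -- the new running minimum
      have hsnd : d.2 ∈ freq.items.map (fun p => p.2.2) := List.mem_map.mpr ⟨(iw.2, d), hmem, rfl⟩
      have hnle : nearest ≤ d.2 := h2 ▸ fm_mem_le _ n d.2 hsnd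
      have hnear' : ((fnrStepA n freq iw).items.map (fun p => p.2.2)).foldl min n
          = (if iw.1 - d.1 < nearest then iw.1 - d.1 else nearest) := by
        rw [hstepA, hitems,
          foldl_min_replace iw.2 (iw.1, min d.2 (iw.1 - d.1)) freq.items d hmem h4 (by simp) n,
          ← h2]
        simp only
        omega
      have hbound : ∀ p ∈ (fnrStepA n freq iw).items, p.2.2 ≤ n := by
        intro p hp
        rw [hstepA, hitems] at hp
        obtain ⟨q, hq, rfl⟩ := List.mem_map.mp hp
        by_cases hq1 : q.1 == iw.2
        · have : d.2 ≤ n := h3 (iw.2, d) hmem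
          simp only [hq1, if_true]
          omega
        · simp only [hq1, Bool.false_eq_true, if_false]
          exact h3 q hq
      have hnodup : ((fnrStepA n freq iw).items.map (fun p => p.1)).Nodup := by
        rw [hstepA, hitems, List.map_map]
        have : (freq.items.map ((fun p => p.1) ∘
            (fun p => if p.1 == iw.2 then (iw.2, (iw.1, min d.2 (iw.1 - d.1))) else p)))
            = freq.items.map (fun p => p.1) := by
          apply List.map_congr_left
          intro p _
          by_cases hp : p.1 = iw.2 <;> simp [hp]
        rw [this]; exact h4
      rw [hstepB]
      exact ih (fnrStepA n freq iw) _ _ hlast' hnear'.symm hbound hnodup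
    · -- fresh word
      have hcf : freq.contains iw.2 = false := by simpa using hc
      have hlastc : last.contains iw.2 = false := by rw [hcont]; exact hcf
      have hstepA : fnrStepA n freq iw = freq.insert iw.2 (iw.1, n) := by
        simp [fnrStepA, hcf]
      have hitems : (freq.insert iw.2 (iw.1, n)).items = freq.items ++ [(iw.2, (iw.1, n))] :=
        PySem.Dict.items_insert_of_not_contains _ _ hcf
      have hstepB : fnrStepB (last, nearest) iw = (last.insert iw.2 iw.1, nearest) := by
        simp [fnrStepB, hlastc]
      have hlast' : last.insert iw.2 iw.1
          = PySem.Dict.mk ((fnrStepA n freq iw).items.map (fun p => (p.1, p.2.1))) := by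
        apply PySem.Dict.ext
        rw [PySem.Dict.items_insert_of_not_contains _ _ hlastc, hstepA, hitems, h1]
        show (freq.items.map fun p => (p.1, p.2.1)) ++ _ = _
        rw [List.map_append]
        rfl
      have hnear' : ((fnrStepA n freq iw).items.map (fun p => p.2.2)).foldl min n = nearest := by
        rw [hstepA, hitems, List.map_append, List.foldl_append, ← h2]
        simp only [List.map_cons, List.map_nil, List.foldl_cons, List.foldl_nil]
        have : nearest ≤ n := h2 ▸ fm_le _ n
        omega
      have hbound : ∀ p ∈ (fnrStepA n freq iw).items, p.2.2 ≤ n := by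
        intro p hp
        rw [hstepA, hitems] at hp
        rcases List.mem_append.mp hp with h | h
        · exact h3 p h
        · simp at h; rw [h]
      have hnotin : iw.2 ∉ freq.items.map (fun p => p.1) := by
        intro hin
        have : freq.contains iw.2 = true := by
          rw [PySem.Dict.contains_eq_decide_mem_keys]
          simp only [PySem.Dict.keys]
          exact decide_eq_true hin
        rw [this] at hcf; cases hcf
      have hnodup : ((fnrStepA n freq iw).items.map (fun p => p.1)).Nodup := by
        rw [hstepA, hitems, List.map_append]
        rw [List.nodup_append]
        refine ⟨h4, by simp, ?_⟩
        intro a ha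
        simp only [List.map_cons, List.map_nil, List.mem_singleton]
        intro b hb
        subst hb
        intro hab
        exact hnotin (hab ▸ ha)
      rw [hstepB]
      exact ih (fnrStepA n freq iw) _ _ hlast' hnear'.symm hbound hnodup

theorem insert_items_ne (d : PySem.Dict String (Int × Int)) (k : String) (v : Int × Int) :
    (d.insert k v).items ≠ [] := by
  by_cases hc : d.contains k
  · rw [PySem.Dict.items_insert_of_contains _ _ hc]
    intro h
    have hitems : d.items = [] := by
      cases hd : d.items with
      | nil => rfl
      | cons q r => rw [hd] at h; cases h
    have : d.contains k = false := by
      rw [PySem.Dict.contains_eq_decide_mem_keys]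
      simp only [PySem.Dict.keys, hitems]
      simp
    rw [this] at hc; cases hc
  · rw [PySem.Dict.items_insert_of_not_contains _ _ (by simpa using hc)]
    simp
theorem stepA_items_ne (n : Int) (freq : PySem.Dict String (Int × Int)) (iw : Int × String) :
    (fnrStepA n freq iw).items ≠ [] := by
  unfold fnrStepA
  by_cases hc : freq.contains iw.2 = false <;> simp [hc] <;> apply insert_items_ne
theorem foldl_stepA_items_ne (n : Int) :
    ∀ (l : List (Int × String)) (freq : PySem.Dict String (Int × Int)),
      freq.items ≠ [] → ((l.foldl (fnrStepA n) freq).items ≠ []) := by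
  intro l
  induction l with
  | nil => intro freq h; exact h
  | cons iw t ih =>
    intro freq _
    exact ih (fnrStepA n freq iw) (stepA_items_ne n freq iw)

theorem find_nearest_repetition_eq_onePass (paragraph : List String) :
    find_nearest_repetition paragraph = fnrOnePass paragraph := by
  cases paragraph with
  | nil => rfl
  | cons w ws =>
    simp only [find_nearest_repetition, fnrOnePass]
    obtain ⟨e1, e2, e3, e4⟩ :=
      fnr_loop ((w :: ws).length : Int) (PySem.List.enumerate (w :: ws))
        PySem.Dict.empty PySem.Dict.empty ((w :: ws).length : Int)
        (by rfl) (by rfl) (by intro p hp; cases hp) (by simp [PySem.Dict.empty])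
    set n : Int := ((w :: ws).length : Int) with hn
    set freq := (PySem.List.enumerate (w :: ws)).foldl (fnrStepA n) PySem.Dict.empty with hfreq
    have hne : freq.items ≠ [] := by
      rw [hfreq, PySem.List.enumerate_cons, List.foldl_cons]
      exact foldl_stepA_items_ne n _ _ (stepA_items_ne n PySem.Dict.empty (0, w))
    cases hitems : freq.items with
    | nil => exact absurd hitems hne
    | cons q rest =>
      have hvals : freq.values.map (fun d => d.2) = q.2.2 :: rest.map (fun p => p.2.2) := by
        simp only [PySem.Dict.values, hitems, List.map_cons, List.map_map]
        rfl
      have hsize : freq.size ≠ 0 := by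
        simp only [PySem.Dict.size, hitems]
        simp
      have hmem_q : q ∈ freq.items := by rw [hitems]; exact List.mem_cons_self
      have hq_le : q.2.2 ≤ n := e3 q hmem_q
      have hm_le : (rest.map (fun p => p.2.2)).foldl min q.2.2 ≤ q.2.2 := fm_le _ _
      rw [hvals, PySem.List.min?_id_cons, if_pos hsize, Option.getD_some, e2, hitems]
      simp only [List.map_cons, List.foldl_cons]
      rw [show min n q.2.2 = min q.2.2 n by omega, fm_comm]
      split_ifs <;> omega

-- ===== the gap characterization relating the one-pass form to the brute force =====

-- g is a gap between two equal words both at index < m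
def GapIn (p : List String) (m g : Int) : Prop :=
  ∃ i j : Int, 0 ≤ i ∧ i < j ∧ j < m ∧ p.getD i.toNat "" = p.getD j.toNat "" ∧ g = j - i

-- b is Python's "-1 if none else minimum" of the gaps described by P
def IsBest (P : Int → Prop) (b : Int) : Prop :=
  (b = -1 ∧ ∀ g, ¬ P g) ∨ (P b ∧ ∀ g, P g → b ≤ g)

theorem isbest_congr {P Q : Int → Prop} (h : ∀ g, P g ↔ Q g) {b : Int} :
    IsBest P b → IsBest Q b := by
  rintro (⟨hb, he⟩ | ⟨hm, hle⟩)
  · exact Or.inl ⟨hb, fun g hg => he g ((h g).mpr hg)⟩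
  · exact Or.inr ⟨(h b).mp hm, fun g hg => hle g ((h g).mpr hg)⟩

theorem isbest_unique {P : Int → Prop} {a b : Int}
    (ha : IsBest P a) (hb : IsBest P b) : a = b := by
  rcases ha with ⟨ha1, ha2⟩ | ⟨ha1, ha2⟩ <;> rcases hb with ⟨hb1, hb2⟩ | ⟨hb1, hb2⟩
  · omega
  · exact absurd hb1 (ha2 b)
  · exact absurd ha1 (hb2 a)
  · have := ha2 b hb1; have := hb2 a ha1; omega

-- Python's update "if best == -1 or g < best: best = g" adds g to the described set
theorem isbest_update {P : Int → Prop} {b : Int} (g : Int) (hg : 1 ≤ g)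
    (hP : ∀ x, P x → 1 ≤ x) (hb : IsBest P b) :
    IsBest (fun x => P x ∨ x = g) (if b == -1 || g < b then g else b) := by
  rcases hb with ⟨hb1, hb2⟩ | ⟨hb1, hb2⟩
  · rw [if_pos (by simp [hb1])]
    refine Or.inr ⟨Or.inr rfl, ?_⟩
    rintro x (hx | rfl)
    · exact absurd hx (hb2 x)
    · omega
  · have hbne : (b == -1) = false := by
      have := hP b hb1; simp; omega
    by_cases hlt : g < b
    · rw [if_pos (by simp [hbne, hlt])]
      refine Or.inr ⟨Or.inr rfl, ?_⟩
      rintro x (hx | rfl)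
      · have := hb2 x hx; omega
      · omega
    · rw [if_neg (by simp [hbne]; omega)]
      refine Or.inr ⟨Or.inl hb1, ?_⟩
      rintro x (hx | rfl)
      · exact hb2 x hx
      · omega

theorem gapIn_lt {p : List String} {m g : Int} (h : GapIn p m g) : g < m := by
  obtain ⟨i, j, h1, h2, h3, h4, h5⟩ := h; omega

theorem gapIn_mono {p : List String} {m m' g : Int} (hm : m ≤ m') (h : GapIn p m g) :
    GapIn p m' g := by
  obtain ⟨i, j, h1, h2, h3, h4, h5⟩ := h
  exact ⟨i, j, h1, h2, by omega, h4, h5⟩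

-- adding index m: the new gaps end at m
theorem gapIn_succ {p : List String} {m : Int} (hm : 0 ≤ m) (g : Int) :
    GapIn p (m + 1) g ↔ GapIn p m g ∨
      ∃ i : Int, 0 ≤ i ∧ i < m ∧ p.getD i.toNat "" = p.getD m.toNat "" ∧ g = m - i := by
  constructor
  · rintro ⟨i, j, h1, h2, h3, h4, h5⟩
    by_cases hj : j < m
    · exact Or.inl ⟨i, j, h1, h2, hj, h4, h5⟩
    · have : j = m := by omega
      subst this
      exact Or.inr ⟨i, h1, h2, h4, h5⟩
  · rintro (⟨i, j, h1, h2, h3, h4, h5⟩ | ⟨i, h1, h2, h4, h5⟩)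
    · exact ⟨i, j, h1, h2, by omega, h4, h5⟩
    · exact ⟨i, m, h1, h2, by omega, h4, h5⟩

-- in-range pyGetD is List.getD at the toNat index
theorem pyGetD_nonneg (xs : List String) (j : Int) (h : 0 ≤ j) :
    PySem.List.pyGetD xs j "" = xs.getD j.toNat "" := by
  have hj : (j.toNat : Int) = j := Int.toNat_of_nonneg h
  rw [← hj, PySem.List.pyGetD_natCast, Int.toNat_natCast]

-- ===== brute-force side =====

-- the inner-loop body of B, named for the proofs (definitionally B's lambda)
def bruteStep (p : List String) (k best j : Int) : Int :=
  if PySem.List.pyGetD p j "" == PySem.List.pyGetD p k ""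
      && (best == -1 || j - k < best) then j - k else best

theorem bruteStep_eq (p : List String) (k b m : Int) (hk : 0 ≤ k) (hm : 0 ≤ m) :
    bruteStep p k b m
      = if p.getD m.toNat "" == p.getD k.toNat "" && (b == -1 || m - k < b)
          then m - k else b := by
  unfold bruteStep
  rw [pyGetD_nonneg p m hm, pyGetD_nonneg p k hk]

-- gaps seen by B after the outer loop has processed all first indices i < k
def GapOuter (p : List String) (k g : Int) : Prop :=
  ∃ i j : Int, 0 ≤ i ∧ i < k ∧ i < j ∧ j < (p.length : Int) ∧
    p.getD i.toNat "" = p.getD j.toNat "" ∧ g = j - i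

-- … plus, during the inner loop at first index k, the pairs (k, j) with j < m
def GapInner (p : List String) (k m g : Int) : Prop :=
  GapOuter p k g ∨
    ∃ j : Int, k < j ∧ j < m ∧ p.getD k.toNat "" = p.getD j.toNat "" ∧ g = j - k

theorem gapOuter_pos {p : List String} {k g : Int} (h : GapOuter p k g) : 1 ≤ g := by
  obtain ⟨i, j, h1, h2, h3, h4, h5, h6⟩ := h; omega

theorem gapInner_pos {p : List String} {k m g : Int} (h : GapInner p k m g) : 1 ≤ g := by
  rcases h with h | ⟨j, h1, h2, h3, h4⟩
  · exact gapOuter_pos h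
  · omega

theorem brute_inner (p : List String) (k : Int) (hk0 : 0 ≤ k) :
    ∀ (cnt : Nat) (m b : Int), ((p.length : Int) - m).toNat = cnt → k < m →
      m ≤ (p.length : Int) → IsBest (GapInner p k m) b →
      IsBest (GapInner p k (p.length : Int))
        ((PySem.List.pyRange m (p.length : Int) 1).foldl (bruteStep p k) b) := by
  intro cnt
  induction cnt with
  | zero =>
    intro m b hcnt hkm hmn hb
    have hm : m = (p.length : Int) := by omega
    subst hm
    rw [PySem.List.pyRange_one_eq_nil (le_refl _)]
    exact hb
  | succ c ih =>
    intro m b hcnt hkm hmn hb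
    have hmlt : m < (p.length : Int) := by omega
    rw [PySem.List.pyRange_one_cons hmlt, List.foldl_cons,
      bruteStep_eq p k b m hk0 (by omega)]
    by_cases heq : p.getD m.toNat "" = p.getD k.toNat ""
    · rw [show (p.getD m.toNat "" == p.getD k.toNat "") = true from by simpa using heq,
        Bool.true_and]
      have hup := isbest_update (P := GapInner p k m) (m - k) (by omega)
        (fun x hx => gapInner_pos hx) hb
      refine ih (m + 1) _ (by omega) (by omega) (by omega) (isbest_congr ?_ hup)
      intro g
      constructor
      · rintro ((ho | ⟨j, h1, h2, h3, h4⟩) | rfl)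
        · exact Or.inl ho
        · exact Or.inr ⟨j, h1, by omega, h3, h4⟩
        · exact Or.inr ⟨m, by omega, by omega, heq.symm, rfl⟩
      · rintro (ho | ⟨j, h1, h2, h3, h4⟩)
        · exact Or.inl (Or.inl ho)
        · by_cases hjm : j < m
          · exact Or.inl (Or.inr ⟨j, h1, hjm, h3, h4⟩)
          · have : j = m := by omega
            subst this
            exact Or.inr (by omega)
    · rw [show (p.getD m.toNat "" == p.getD k.toNat "") = false from by simpa using heq,
        Bool.false_and, if_neg (by simp)]
      refine ih (m + 1) b (by omega) (by omega) (by omega) (isbest_congr ?_ hb)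
      intro g
      constructor
      · rintro (ho | ⟨j, h1, h2, h3, h4⟩)
        · exact Or.inl ho
        · exact Or.inr ⟨j, h1, by omega, h3, h4⟩
      · rintro (ho | ⟨j, h1, h2, h3, h4⟩)
        · exact Or.inl ho
        · by_cases hjm : j < m
          · exact Or.inr ⟨j, h1, hjm, h3, h4⟩
          · have : j = m := by omega
            subst this
            exact absurd h3.symm heq

theorem brute_outer (p : List String) :
    ∀ (cnt : Nat) (k b : Int), ((p.length : Int) - k).toNat = cnt → 0 ≤ k →
      k ≤ (p.length : Int) → IsBest (GapOuter p k) b →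
      IsBest (GapOuter p (p.length : Int))
        ((PySem.List.pyRange k (p.length : Int) 1).foldl
          (fun best i =>
            (PySem.List.pyRange (i + 1) (p.length : Int) 1).foldl (bruteStep p i) best) b) := by
  intro cnt
  induction cnt with
  | zero =>
    intro k b hcnt hk0 hkn hb
    have hk : k = (p.length : Int) := by omega
    subst hk
    rw [PySem.List.pyRange_one_eq_nil (le_refl _)]
    exact hb
  | succ c ih =>
    intro k b hcnt hk0 hkn hb
    have hklt : k < (p.length : Int) := by omega
    rw [PySem.List.pyRange_one_cons hklt, List.foldl_cons]
    have hb' : IsBest (GapInner p k (k + 1)) b := by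
      refine isbest_congr ?_ hb
      intro g
      constructor
      · exact fun h => Or.inl h
      · rintro (h | ⟨j, h1, h2, h3, h4⟩)
        · exact h
        · omega
    have hin := brute_inner p k hk0 ((p.length : Int) - (k + 1)).toNat (k + 1) b rfl
      (by omega) (by omega) hb'
    refine ih (k + 1) _ (by omega) (by omega) (by omega) (isbest_congr ?_ hin)
    intro g
    constructor
    · rintro (⟨i, j, h1, h2, h3, h4, h5, h6⟩ | ⟨j, h1, h2, h3, h4⟩)
      · exact ⟨i, j, h1, by omega, h3, h4, h5, h6⟩
      · exact ⟨k, j, hk0, by omega, h1, h2, h3, h4⟩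
    · rintro ⟨i, j, h1, h2, h3, h4, h5, h6⟩
      by_cases hik : i < k
      · exact Or.inl ⟨i, j, h1, hik, h3, h4, h5, h6⟩
      · have : i = k := by omega
        subst this
        exact Or.inr ⟨j, h3, h4, h5, h6⟩

theorem brute_isbest (p : List String) :
    IsBest (GapIn p (p.length : Int)) (find_nearest_repetition_alt p) := by
  have h0 : IsBest (GapOuter p 0) (-1) := by
    refine Or.inl ⟨rfl, ?_⟩
    rintro g ⟨i, j, h1, h2, h3, h4, h5, h6⟩
    omega
  have h := brute_outer p ((p.length : Int) - 0).toNat 0 (-1) rfl (le_refl 0)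
    (by positivity) h0
  have hiff : ∀ g, GapOuter p (p.length : Int) g ↔ GapIn p (p.length : Int) g := by
    intro g
    constructor
    · rintro ⟨i, j, h1, h2, h3, h4, h5, h6⟩
      exact ⟨i, j, h1, h3, h4, h5, h6⟩
    · rintro ⟨i, j, h1, h2, h3, h4, h5⟩
      exact ⟨i, j, h1, by omega, h2, h3, h4, h5⟩
  have halt : find_nearest_repetition_alt p
      = (PySem.List.pyRange 0 (p.length : Int) 1).foldl
          (fun best i =>
            (PySem.List.pyRange (i + 1) (p.length : Int) 1).foldl (bruteStep p i) best)
          (-1) := rfl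
  rw [halt]
  exact isbest_congr hiff h

-- ===== one-pass side =====

-- the dict holds, for each word seen so far (index < m), its most recent index
def InvLast (p : List String) (m : Int) (last : PySem.Dict String Int) : Prop :=
  ∀ w : String,
    (last.contains w = true ↔ ∃ i : Int, 0 ≤ i ∧ i < m ∧ p.getD i.toNat "" = w) ∧
    (∀ l, last.get? w = some l → 0 ≤ l ∧ l < m ∧ p.getD l.toNat "" = w ∧
        ∀ i : Int, 0 ≤ i → i < m → p.getD i.toNat "" = w → i ≤ l)

-- the running minimum is n if no gap yet, else the least gap among indices < m
def InvNear (p : List String) (m near : Int) : Prop :=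
  (near = (p.length : Int) ∧ ∀ g, ¬ GapIn p m g) ∨
    (GapIn p m near ∧ ∀ g, GapIn p m g → near ≤ g)

theorem invLast_insert {p : List String} {m : Nat} {last : PySem.Dict String Int} {x : String}
    (hx : p.getD m "" = x) (hinv : InvLast p (m : Int) last) :
    InvLast p ((m : Int) + 1) (last.insert x (m : Int)) := by
  intro w
  by_cases hw : w = x
  · subst hw
    constructor
    · constructor
      · intro _
        exact ⟨(m : Int), by omega, by omega, by simpa using hx⟩
      · intro _
        simp
    · intro l hl
      obtain rfl : (m : Int) = l := by simpa [PySem.Dict.get?_insert] using hl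
      refine ⟨by omega, by omega, by simpa using hx, ?_⟩
      intro i hi0 him hieq
      omega
  · have hget : (last.insert x (m : Int)).get? w = last.get? w := by
      rw [PySem.Dict.get?_insert, if_neg hw]
    constructor
    · rw [PySem.Dict.contains_eq_isSome_get?, hget, ← PySem.Dict.contains_eq_isSome_get?]
      rw [(hinv w).1]
      constructor
      · rintro ⟨i, h1, h2, h3⟩
        exact ⟨i, h1, by omega, h3⟩
      · rintro ⟨i, h1, h2, h3⟩
        refine ⟨i, h1, ?_, h3⟩
        by_contra hge
        have : i = (m : Int) := by omega
        subst this
        rw [show (m : Int).toNat = m by omega] at h3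
        exact hw (h3 ▸ hx)
    · intro l hl
      rw [hget] at hl
      obtain ⟨h1, h2, h3, h4⟩ := (hinv w).2 l hl
      refine ⟨h1, by omega, h3, ?_⟩
      intro i hi0 him hieq
      by_cases hilt : i < (m : Int)
      · exact h4 i hi0 hilt hieq
      · exfalso
        have : i = (m : Int) := by omega
        subst this
        rw [show (m : Int).toNat = m by omega] at hieq
        exact hw (hieq ▸ hx)

theorem onePass_loop (p : List String) :
    ∀ (suf : List String) (m : Nat) (last : PySem.Dict String Int) (near : Int),
      p.drop m = suf → m ≤ p.length →
      InvLast p (m : Int) last → InvNear p (m : Int) near →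
      InvNear p (p.length : Int)
        ((PySem.List.enumerate suf (m : Int)).foldl fnrStepB (last, near)).2 := by
  intro suf
  induction suf with
  | nil =>
    intro m last near hdrop hle hlast hnear
    have hm : m = p.length := by
      have := congrArg List.length hdrop
      simp at this
      omega
    subst hm
    simpa using hnear
  | cons x t ih =>
    intro m last near hdrop hle hlast hnear
    have hmlt : m < p.length := by
      by_contra hge
      rw [List.drop_eq_nil_of_le (by omega)] at hdrop
      exact absurd hdrop.symm (List.cons_ne_nil x t)
    have hx : p.getD m "" = x := by
      have h0 : (p.drop m)[0]? = some x := by rw [hdrop]; rfl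
      rw [List.getElem?_drop] at h0
      simp only [Nat.add_zero] at h0
      rw [List.getD_eq_getElem?_getD, h0]
      rfl
    have hdrop' : p.drop (m + 1) = t := by
      rw [← List.tail_drop, hdrop]
      rfl
    rw [PySem.List.enumerate_cons, List.foldl_cons]
    have hcast : (m : Int) + 1 = ((m + 1 : Nat) : Int) := by push_cast; ring
    by_cases hc : last.contains x
    · -- repeated word: shrink the running minimum by the gap to the last occurrence
      obtain ⟨l, hl⟩ : ∃ l, last.get? x = some l := by
        rw [PySem.Dict.contains_eq_isSome_get?] at hc
        cases h : last.get? x with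
        | none => rw [h] at hc; cases hc
        | some v => exact ⟨v, rfl⟩
      obtain ⟨hl0, hlm, hleq, hlmax⟩ := (hlast x).2 l hl
      have hgetD : last.getD x 0 = l := PySem.Dict.getD_of_get?_eq_some _ _ hl
      have hstep : fnrStepB (last, near) ((m : Int), x)
          = (last.insert x (m : Int), if (m : Int) - l < near then (m : Int) - l else near) := by
        simp [fnrStepB, hc, hgetD]
      rw [hstep, hcast]
      refine ih (m + 1) _ _ hdrop' (by omega) (hcast ▸ invLast_insert hx hlast) ?_
      rw [← hcast]
      -- the new minimal gap: m - l is a new gap, and every new gap is ≥ m - l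
      have hnewmem : GapIn p ((m : Int) + 1) ((m : Int) - l) := by
        refine ⟨l, (m : Int), hl0, by omega, by omega, ?_, rfl⟩
        rw [hleq, show (m : Int).toNat = m by omega, hx]
      have hnewge : ∀ g, GapIn p ((m : Int) + 1) g → GapIn p (m : Int) g ∨ (m : Int) - l ≤ g := by
        intro g hg
        rcases (gapIn_succ (by omega) g).mp hg with h | ⟨i, h1, h2, h3, h4⟩
        · exact Or.inl h
        · right
          have : i ≤ l := by
            refine hlmax i h1 h2 ?_
            rw [h3, show (m : Int).toNat = m by omega, hx]
          omega
      rcases hnear with ⟨hn1, hn2⟩ | ⟨hn1, hn2⟩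
      · -- no gap yet: running min was n, the new gap wins
        have hlt : (m : Int) - l < near := by
          have : (m : Int) < (p.length : Int) := by exact_mod_cast hmlt
          omega
        rw [if_pos hlt]
        refine Or.inr ⟨hnewmem, ?_⟩
        intro g hg
        rcases hnewge g hg with h | h
        · exact absurd h (hn2 g)
        · exact h
      · -- a minimum is running: take the smaller of it and the new gap
        by_cases hlt : (m : Int) - l < near
        · rw [if_pos hlt]
          refine Or.inr ⟨hnewmem, ?_⟩
          intro g hg
          rcases hnewge g hg with h | h
          · have := hn2 g h; omega
          · exact h
        · rw [if_neg hlt]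
          refine Or.inr ⟨gapIn_mono (by omega) hn1, ?_⟩
          intro g hg
          rcases hnewge g hg with h | h
          · exact hn2 g h
          · omega
    · -- fresh word: no new gap
      have hcf : last.contains x = false := by simpa using hc
      have hnone : ∀ i : Int, 0 ≤ i → i < (m : Int) → p.getD i.toNat "" ≠ x := by
        intro i h1 h2 h3
        have := (hlast x).1.mpr ⟨i, h1, h2, h3⟩
        rw [hcf] at this
        cases this
      have hstep : fnrStepB (last, near) ((m : Int), x) = (last.insert x (m : Int), near) := by
        simp [fnrStepB, hcf]
      rw [hstep, hcast]
      refine ih (m + 1) _ _ hdrop' (by omega) (hcast ▸ invLast_insert hx hlast) ?_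
      rw [← hcast]
      have hsame : ∀ g, GapIn p ((m : Int) + 1) g ↔ GapIn p (m : Int) g := by
        intro g
        constructor
        · intro hg
          rcases (gapIn_succ (by omega) g).mp hg with h | ⟨i, h1, h2, h3, h4⟩
          · exact h
          · exact absurd (show p.getD i.toNat "" = x by
              rw [h3, show (m : Int).toNat = m by omega, hx]) (hnone i h1 h2)
        · exact gapIn_mono (by omega)
      rcases hnear with ⟨hn1, hn2⟩ | ⟨hn1, hn2⟩
      · exact Or.inl ⟨hn1, fun g hg => hn2 g ((hsame g).mp hg)⟩
      · exact Or.inr ⟨(hsame near).mpr hn1, fun g hg => hn2 g ((hsame g).mp hg)⟩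

theorem onePass_isbest (p : List String) :
    IsBest (GapIn p (p.length : Int)) (fnrOnePass p) := by
  have hlast0 : InvLast p ((0 : Nat) : Int) PySem.Dict.empty := by
    intro w
    constructor
    · rw [PySem.Dict.contains_empty]
      constructor
      · intro h; cases h
      · rintro ⟨i, h1, h2, h3⟩; omega
    · intro l hl
      rw [PySem.Dict.get?_empty] at hl
      cases hl
  have hnear0 : InvNear p ((0 : Nat) : Int) (p.length : Int) := by
    refine Or.inl ⟨rfl, ?_⟩
    rintro g ⟨i, j, h1, h2, h3, h4, h5⟩
    simp at h3
    omega
  have h := onePass_loop p p 0 PySem.Dict.empty (p.length : Int) (by simp) (by omega)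
    hlast0 hnear0
  simp only [Nat.cast_zero] at h
  have hbody : fnrOnePass p
      = (if ((PySem.List.enumerate p 0).foldl fnrStepB (PySem.Dict.empty, (p.length : Int))).2
            < (p.length : Int)
          then ((PySem.List.enumerate p 0).foldl fnrStepB
            (PySem.Dict.empty, (p.length : Int))).2 else -1) := rfl
  rw [hbody]
  rcases h with ⟨hn1, hn2⟩ | ⟨hn1, hn2⟩
  · rw [hn1]
    simp only [lt_self_iff_false, if_false]
    exact Or.inl ⟨rfl, hn2⟩
  · have hlt := gapIn_lt hn1
    rw [if_pos hlt]
    exact Or.inr ⟨hn1, hn2⟩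

theorem find_nearest_repetition_eq (paragraph : List String) :
    find_nearest_repetition paragraph = find_nearest_repetition_alt paragraph := by
  rw [find_nearest_repetition_eq_onePass]
  exact isbest_unique (onePass_isbest paragraph) (brute_isbest paragraph)

-- ===== VERDICT (by name: the statement is the Claim_ definition above) =====
theorem find_nearest_repetition_spec : Claim_equal_find_nearest_repetition := by
  intro paragraph _
  exact find_nearest_repetition_eq paragraph
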